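-- pv_equiv track=rewrite | github.com/Belalglab/CS-2130 | prog11.py | is_transitive
-- ===== SOURCE A (Python) =====
-- def is_transitive(A, size):
--     for i in range(size):
--         for j in range(size):
--             if A[i][j]:
--                 for k in range(size):
--                     if A[j][k] and not A[i][k]:
--                         return False
--     return True
-- ===== SOURCE B (Python) =====
-- def is_transitive(A, size):
--     # Pack each row into an integer bitmask, then check R o R <= R row-wise:
--     # reach = union (bitwise OR) of rows reachable in two steps from i.
--     masks = []
--     for r in range(size):
--         m = 0
--         for c in range(size):
--             if A[r][c]:
--                 m |= 1 << c
--         masks.append(m)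
--     for i in range(size):
--         reach = 0
--         for j in range(size):
--             if masks[i] >> j & 1:
--                 reach |= masks[j]
--         if reach | masks[i] != masks[i]:
--             return False
--     return True
-- ===== Notes on version B (the rewrite author's own statement) =====
-- stated objective: alternative
-- what changed: B packs each row into an integer bitmask and checks transitivity as relational composition containment: per row i it ORs together the masks of all successors of i and compares the union against row i's mask with one bitwise test, replacing A's triple nested element loop with bit-parallel word operations.
-- outside the precondition, e.g. on is_transitive([[0, 1], [1]], 2): A returns False, B raises IndexError
import Mathlib
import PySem

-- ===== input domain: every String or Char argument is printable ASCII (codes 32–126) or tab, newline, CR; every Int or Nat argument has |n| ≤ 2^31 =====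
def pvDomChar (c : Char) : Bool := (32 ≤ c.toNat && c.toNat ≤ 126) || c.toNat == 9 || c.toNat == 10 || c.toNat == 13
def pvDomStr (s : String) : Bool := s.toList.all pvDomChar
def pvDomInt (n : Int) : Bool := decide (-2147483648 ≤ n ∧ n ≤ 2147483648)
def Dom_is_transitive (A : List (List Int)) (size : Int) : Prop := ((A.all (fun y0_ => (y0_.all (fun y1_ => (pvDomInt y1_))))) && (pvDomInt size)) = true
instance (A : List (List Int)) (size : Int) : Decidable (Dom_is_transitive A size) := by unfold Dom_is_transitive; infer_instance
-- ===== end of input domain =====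

-- B packs each row into an integer bitmask and checks R∘R ⊆ R row-wise with bitwise OR/compare,
-- replacing A's triple nested element loop (alternative algorithm; equivalence of RETURN values proved).

-- shared indexing helper: truthiness of A[i][j] (both Pythons index the matrix the same way; in-range under Pre_)
def pvAt (A : List (List Int)) (i j : Int) : Bool :=
  ((PySem.List.pyGet? (PySem.List.pyGet? A i |>.getD []) j).getD 0) != 0

-- ===== PORT A =====
def is_transitive (A : List (List Int)) (size : Int) : Bool :=
  (PySem.List.pyRange 0 size 1).all (fun i =>
    (PySem.List.pyRange 0 size 1).all (fun j =>
      !(pvAt A i j) ||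
        (PySem.List.pyRange 0 size 1).all (fun k =>
          !(pvAt A j k && !(pvAt A i k)))))

-- ===== PORT B =====
-- masks are Python ints that stay nonnegative, ported as Nat; c.toNat is exact since pyRange 0 size 1 yields only nonnegative c
def pvRowMask (A : List (List Int)) (size r : Int) : Nat :=
  (PySem.List.pyRange 0 size 1).foldl (fun m c => if pvAt A r c then m ||| (1 <<< c.toNat) else m) 0

def is_transitive_alt (A : List (List Int)) (size : Int) : Bool :=
  let masks := (PySem.List.pyRange 0 size 1).map (fun r => pvRowMask A size r)
  (PySem.List.pyRange 0 size 1).all (fun i =>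
    let mi := PySem.List.pyGetD masks i 0
    let reach := (PySem.List.pyRange 0 size 1).foldl
      (fun reach j => if (mi >>> j.toNat) &&& 1 != 0 then reach ||| PySem.List.pyGetD masks j 0 else reach) 0
    reach ||| mi == mi)

-- ===== PRECONDITION & SPEC =====
-- Pre_ excludes matrices with fewer than `size` rows, or a short row among the first `size`,
-- where indexing raises IndexError in Python (A may still return early on a few such inputs,
-- but B's upfront mask construction raises there).
def Pre_is_transitive (A : List (List Int)) (size : Int) : Prop :=
  size ≤ (A.length : Int) ∧ ∀ row ∈ A.take size.toNat, size ≤ (row.length : Int)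
instance (A : List (List Int)) (size : Int) : Decidable (Pre_is_transitive A size) := by
  unfold Pre_is_transitive; infer_instance

def pvWitness_is_transitive : List (List Int) × Int := ([[1, 1], [0, 1]], 2)

def Spec_is_transitive (A : List (List Int)) (size : Int) (out : Bool) : Prop := out = is_transitive_alt A size
instance (A : List (List Int)) (size : Int) (out : Bool) : Decidable (Spec_is_transitive A size out) := by unfold Spec_is_transitive; infer_instance

-- ===== CLAIM (what is proved, stated in full; the proofs are below) =====
def Claim_equal_is_transitive : Prop := ∀ (A : List (List Int)) (size : Int), Dom_is_transitive A size → Pre_is_transitive A size → Spec_is_transitive A size (is_transitive A size)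

-- ===== LEMMAS AND PROOFS =====

-- bits of a mask built by OR-ing 1 <<< c.toNat over the filtered list
theorem foldl_mask_testBit (l : List Int) (p : Int → Bool) (m0 : Nat) (k : Nat) :
    ((l.foldl (fun m c => if p c then m ||| (1 <<< c.toNat) else m) m0).testBit k)
      = (m0.testBit k || l.any (fun c => p c && c.toNat == k)) := by
  induction l generalizing m0 with
  | nil => simp
  | cons c l ih =>
    simp only [List.foldl_cons, List.any_cons, ih]
    by_cases hp : p c = true
    · have hcc : (c.toNat == k) = decide (c.toNat = k) := by
        by_cases hc : c.toNat = k <;> simp [hc]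
      by_cases hc : c.toNat = k
      · simp [hp, hc, Nat.testBit_or, Nat.shiftLeft_eq]
      · simp [hp, hc, hcc, Nat.testBit_or, Nat.shiftLeft_eq]
    · simp [hp]

theorem rowMask_testBit (A : List (List Int)) (size r : Int) (k : Nat) :
    (pvRowMask A size r).testBit k = (decide ((k : Int) < size) && pvAt A r (k : Int)) := by
  rw [pvRowMask, foldl_mask_testBit]
  simp only [Nat.zero_testBit, Bool.false_or]
  by_cases h : (k : Int) < size
  · simp only [h, decide_true, Bool.true_and]
    rw [Bool.eq_iff_iff, List.any_eq_true]
    constructor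
    · rintro ⟨c, hcm, hpc⟩
      rw [PySem.List.mem_pyRange_one] at hcm
      rw [Bool.and_eq_true, beq_iff_eq] at hpc
      have : c = (k : Int) := by omega
      subst this; exact hpc.1
    · intro hp
      exact ⟨(k : Int), PySem.List.mem_pyRange_one.mpr ⟨by positivity, h⟩, by simp [hp]⟩
  · simp only [h, decide_false, Bool.false_and]
    rw [List.any_eq_false]
    intro c hcm
    rw [PySem.List.mem_pyRange_one] at hcm
    simp only [Bool.and_eq_true, beq_iff_eq, not_and]
    intro _ hck
    omega

-- bits of the reach accumulator
theorem foldl_reach_testBit (l : List Int) (q : Int → Bool) (f : Int → Nat) (k : Nat) :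
    ((l.foldl (fun acc j => if q j then acc ||| f j else acc) 0).testBit k)
      = l.any (fun j => q j && (f j).testBit k) := by
  suffices h : ∀ a0 : Nat, ((l.foldl (fun acc j => if q j then acc ||| f j else acc) a0).testBit k)
      = (a0.testBit k || l.any (fun j => q j && (f j).testBit k)) by
    simpa using h 0
  induction l with
  | nil => simp
  | cons j l ih =>
    intro a0
    simp only [List.foldl_cons, List.any_cons, ih]
    by_cases hq : q j = true
    · simp only [hq, if_true, Nat.testBit_or, Bool.or_assoc, Bool.true_and]
    · simp [hq]

theorem or_eq_right_iff (a m : Nat) : (a ||| m = m) ↔ ∀ k, a.testBit k = true → m.testBit k = true := by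
  constructor
  · intro h k hk
    have := congrArg (fun x => x.testBit k) h
    simp only [Nat.testBit_or, hk, Bool.true_or] at this
    exact this.symm
  · intro h
    apply Nat.eq_of_testBit_eq
    intro k
    simp only [Nat.testBit_or]
    by_cases hk : a.testBit k = true
    · simp [hk, h k hk]
    · simp [Bool.eq_false_iff.mpr hk]

theorem masks_lookup (A : List (List Int)) (size i : Int) (h0 : 0 ≤ i) (h1 : i < size) :
    PySem.List.pyGetD ((PySem.List.pyRange 0 size 1).map (fun r => pvRowMask A size r)) i 0
      = pvRowMask A size i :=
  PySem.List.pyGetD_map_pyRange_of_nonneg (fun r => pvRowMask A size r) size i 0 h0 h1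

theorem portA_iff (A : List (List Int)) (size : Int) :
    is_transitive A size = true ↔
      ∀ i, 0 ≤ i → i < size → ∀ j, 0 ≤ j → j < size → pvAt A i j = true →
        ∀ k, 0 ≤ k → k < size → pvAt A j k = true → pvAt A i k = true := by
  simp [is_transitive, List.all_eq_true, PySem.List.mem_pyRange_one]
  constructor
  · intro h i h0 h1 j h2 h3 hij k h4 h5 hjk
    rcases h i h0 h1 j h2 h3 with hf | hall
    · simp [hij] at hf
    · rcases hall k h4 h5 with hf | ht
      · simp [hjk] at hf
      · exact ht
  · intro h i h0 h1 j h2 h3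
    by_cases hij : pvAt A i j = true
    · refine Or.inr (fun k h4 h5 => ?_)
      by_cases hjk : pvAt A j k = true
      · exact Or.inr (h i h0 h1 j h2 h3 hij k h4 h5 hjk)
      · exact Or.inl (by simpa using hjk)
    · exact Or.inl (by simpa using hij)

theorem bit_test_eq_testBit (m : Nat) (t : Nat) : ((m >>> t) &&& 1 != 0) = m.testBit t := by
  simp [Nat.testBit, Nat.and_comm]

theorem portB_iff (A : List (List Int)) (size : Int) :
    is_transitive_alt A size = true ↔
      ∀ i, 0 ≤ i → i < size → ∀ j, 0 ≤ j → j < size → pvAt A i j = true →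
        ∀ k, 0 ≤ k → k < size → pvAt A j k = true → pvAt A i k = true := by
  simp only [is_transitive_alt, List.all_eq_true, PySem.List.mem_pyRange_one, beq_iff_eq]
  constructor
  · intro h i h0 h1 j h2 h3 hij k h4 h5 hjk
    have hi := h i ⟨h0, h1⟩
    rw [masks_lookup A size i h0 h1, or_eq_right_iff] at hi
    have hr := foldl_reach_testBit (PySem.List.pyRange 0 size 1)
        (fun j => (pvRowMask A size i >>> j.toNat) &&& 1 != 0)
        (fun j => PySem.List.pyGetD ((PySem.List.pyRange 0 size 1).map (fun r => pvRowMask A size r)) j 0)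
        k.toNat
    have hbit : (pvRowMask A size i).testBit j.toNat = true := by
      rw [rowMask_testBit]
      simp [Int.toNat_of_nonneg h2, h3, hij]
    have hmem : ((fun j => (pvRowMask A size i >>> j.toNat) &&& 1 != 0) j &&
        ((fun j => PySem.List.pyGetD ((PySem.List.pyRange 0 size 1).map (fun r => pvRowMask A size r)) j 0) j).testBit k.toNat) = true := by
      simp only [bit_test_eq_testBit, hbit, Bool.true_and]
      rw [masks_lookup A size j h2 h3, rowMask_testBit]
      simp [Int.toNat_of_nonneg h4, h5, hjk]
    have hreach : ((PySem.List.pyRange 0 size 1).foldl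
        (fun acc j => if (pvRowMask A size i >>> j.toNat) &&& 1 != 0 then
          acc ||| PySem.List.pyGetD ((PySem.List.pyRange 0 size 1).map (fun r => pvRowMask A size r)) j 0 else acc) 0).testBit k.toNat = true := by
      rw [hr]
      exact List.any_eq_true.mpr ⟨j, PySem.List.mem_pyRange_one.mpr ⟨h2, h3⟩, hmem⟩
    have hfin := hi k.toNat hreach
    rw [rowMask_testBit, Bool.and_eq_true] at hfin
    rw [Int.toNat_of_nonneg h4] at hfin
    exact hfin.2
  · intro h i hi
    rw [masks_lookup A size i hi.1 hi.2, or_eq_right_iff]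
    intro k hk
    rw [foldl_reach_testBit] at hk
    rcases List.any_eq_true.mp hk with ⟨j, hjmem, hj⟩
    rcases PySem.List.mem_pyRange_one.mp hjmem with ⟨h2, h3⟩
    rw [Bool.and_eq_true, bit_test_eq_testBit, rowMask_testBit] at hj
    rcases hj with ⟨hij, hjk⟩
    rw [masks_lookup A size j h2 h3, rowMask_testBit] at hjk
    rw [Bool.and_eq_true, decide_eq_true_eq] at hij hjk
    rw [Int.toNat_of_nonneg h2] at hij
    rw [rowMask_testBit, Bool.and_eq_true]
    exact ⟨by simp [hjk.1], h i hi.1 hi.2 j h2 h3 hij.2 k (by positivity) hjk.1 hjk.2⟩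

theorem ports_agree (A : List (List Int)) (size : Int) :
    is_transitive A size = is_transitive_alt A size := by
  rw [Bool.eq_iff_iff, portA_iff, portB_iff]

-- ===== VERDICT (by name: the statement is the Claim_ definition above) =====
theorem is_transitive_spec : Claim_equal_is_transitive := by
  intro A size _ _
  unfold Spec_is_transitive
  exact ports_agree A size
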